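-- pv_equiv track=rewrite | github.com/svng-zu/programmers | 프로그래머스/unrated/132267. 콜라 문제/콜라 문제.py | solution
-- ===== SOURCE A (Python) =====
-- def solution(a, b, n):
--     answer = 0
--     cnt = 0 # a개 콜라를 바꾸는 횟수
--     while n >= a :
--         n -= a
--         cnt += 1
--         n += b #바꿔준 콜라 개수 만큼 더해주기
--
--     answer = cnt*b
--     return answer
-- ===== SOURCE B (Python) =====
-- def solution(a, b, n):
--     # Closed form: each exchange removes (a-b) bottles while n >= a,
--     # so the number of exchanges is (n-a)//(a-b) + 1 when n >= a, else 0.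
--     if n < a:
--         return 0
--     return ((n - a) // (a - b) + 1) * b
-- ===== Notes on version B (the rewrite author's own statement) =====
-- stated objective: alternative
-- what changed: Replaces the simulation loop (subtract a, add b, count, repeat) with the closed-form exchange count (n-a)//(a-b)+1 multiplied by b; Pre_ excludes a<=b with n>=a, where A's loop never terminates.
import Mathlib
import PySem

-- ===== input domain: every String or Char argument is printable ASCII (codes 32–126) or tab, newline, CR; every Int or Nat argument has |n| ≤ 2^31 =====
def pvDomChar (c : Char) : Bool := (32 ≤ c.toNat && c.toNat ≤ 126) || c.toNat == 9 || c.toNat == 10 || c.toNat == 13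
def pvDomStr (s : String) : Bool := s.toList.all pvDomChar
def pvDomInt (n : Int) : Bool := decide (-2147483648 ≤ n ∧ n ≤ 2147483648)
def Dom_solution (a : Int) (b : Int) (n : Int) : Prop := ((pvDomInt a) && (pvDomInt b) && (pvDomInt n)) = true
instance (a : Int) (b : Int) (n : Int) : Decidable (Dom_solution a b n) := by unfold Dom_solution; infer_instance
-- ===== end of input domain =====

-- B replaces A's exchange-simulation loop with the closed form ((n-a)//(a-b)+1)*b.

-- ===== PORT A =====
-- A's while loop, transliterated with a fuel bound; on Pre_ inputs the loop runs
-- at most (n - a + 1).toNat times (each pass removes a - b ≥ 1 bottles), so the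
-- fuel never runs out and the guard only makes the recursion total.
def solutionLoop (a : Int) (b : Int) : Nat → Int → Int → Int
  | 0, cnt, _ => cnt
  | f + 1, cnt, n => if a ≤ n then solutionLoop a b f (cnt + 1) (n - a + b) else cnt

def solution (a : Int) (b : Int) (n : Int) : Int :=
  (solutionLoop a b (n - a + 1).toNat 0 n) * b

-- ===== PORT B =====
def solution_alt (a : Int) (b : Int) (n : Int) : Int :=
  if n < a then 0 else (PySem.Int.floordiv (n - a) (a - b) + 1) * b

-- ===== PRECONDITION & SPEC =====
-- Pre_ excludes a ≤ b together with n ≥ a: there A's while loop never terminates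
-- (n never drops below a), so A returns no value.
def Pre_solution (a : Int) (b : Int) (n : Int) : Prop := b < a ∨ n < a
instance (a : Int) (b : Int) (n : Int) : Decidable (Pre_solution a b n) := by unfold Pre_solution; infer_instance
def pvWitness_solution : Int × Int × Int := (3, 1, 20)

def Spec_solution (a : Int) (b : Int) (n : Int) (out : Int) : Prop := out = solution_alt a b n
instance (a : Int) (b : Int) (n : Int) (out : Int) : Decidable (Spec_solution a b n out) := by unfold Spec_solution; infer_instance

-- ===== CLAIM (what is proved, stated in full; the proofs are below) =====
def Claim_equal_solution : Prop := ∀ (a : Int) (b : Int) (n : Int), Dom_solution a b n → Pre_solution a b n → Spec_solution a b n (solution a b n)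

-- ===== LEMMAS AND PROOFS =====

-- Loop invariant: with enough fuel and a > b, the loop returns cnt plus the
-- closed-form number of remaining exchanges.
theorem solutionLoop_closed (a b : Int) (hb : b < a) :
    ∀ (f : Nat) (cnt n : Int), (n - a + 1).toNat ≤ f →
      solutionLoop a b f cnt n =
        cnt + (if a ≤ n then (n - a).fdiv (a - b) + 1 else 0) := by
  intro f
  induction f with
  | zero =>
    intro cnt n hf
    have : n < a := by omega
    simp [solutionLoop, not_le.mpr this]
  | succ f ih =>
    intro cnt n hf
    by_cases h : a ≤ n
    · have hf' : (n - a + b - a + 1).toNat ≤ f := by omega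
      rw [solutionLoop, if_pos h, ih (cnt + 1) (n - a + b) hf']
      have hd : 0 < a - b := by omega
      by_cases h2 : a ≤ n - a + b
      · rw [if_pos h2, if_pos h]
        have : (n - a).fdiv (a - b) = (n - a + b - a).fdiv (a - b) + 1 := by
          have := Int.add_mul_fdiv_right (n - a + b - a) 1 (by omega : a - b ≠ 0)
          have he : n - a + b - a + 1 * (a - b) = n - a := by ring
          rw [he] at this
          omega
        omega
      · rw [if_neg h2, if_pos h]
        have h0 : 0 ≤ n - a := by omega
        have h1 : n - a < a - b := by omega
        have : (n - a).fdiv (a - b) = 0 := by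
          rw [Int.fdiv_eq_ediv_of_nonneg _ (by omega : (0:Int) ≤ a - b)]
          exact Int.ediv_eq_zero_of_lt h0 h1
        omega
    · rw [solutionLoop, if_neg h]
      simp [h]

-- ===== VERDICT (by name: the statement is the Claim_ definition above) =====
theorem solution_spec : Claim_equal_solution := by
  intro a b n _ hpre
  unfold Spec_solution solution solution_alt
  by_cases h : n < a
  · have : ¬ a ≤ n := not_le.mpr h
    rcases Nat.eq_zero_or_pos (n - a + 1).toNat with h0 | h0
    · rw [h0]; simp [solutionLoop, h]
    · obtain ⟨f, hf⟩ := Nat.exists_eq_succ_of_ne_zero (Nat.pos_iff_ne_zero.mp h0)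
      rw [hf, solutionLoop, if_neg this]
      simp [h]
  · have hb : b < a := by rcases hpre with h' | h'; exact h'; omega
    rw [solutionLoop_closed a b hb _ 0 n (le_refl _)]
    have ha : a ≤ n := not_lt.mp h
    rw [if_neg h, if_pos ha]
    simp [PySem.Int.floordiv]
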